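-- pv_equiv track=rewrite | github.com/yudyandrea/114562_FierroYudy2 | Ejercicio18.py | mas_apariciones
-- ===== SOURCE A (Python) =====
-- def mas_apariciones (lista):
--     ''' Selecciona en una lista los valores que más se encuentran en ella.
--
--         Retorna el o los valores que más se repiten incrementados en 1, y el
--         número de veces que estos aparecen.
--     '''
--
--     count=0
--     fila_max=[]
--     count_max =0
--
--     for i in range (len(lista)):       # Iteración en cada fila de la matriz
--         count=0
--
--         for j in range(i,len(lista)):  # Contador de apariciones en la lista.
--             if lista[j] == i:
--                 count+=1
--
--         if count == count_max:    # Adición de índices a la lista, que determi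
--             fila_max.append(i+1)  # nará las filas con mayor incidencia.
--
--         elif count> count_max:
--              count_max=count
--              fila_max=[i+1]       # Se adiciona 1 por legibilidad al momento de
--                                   # la impresión.
--     return fila_max, count_max
-- ===== SOURCE B (Python) =====
-- def mas_apariciones(lista):
--     ''' Same result as A: for each index i, counts occurrences of the VALUE i
--         in the suffix lista[i:], and returns ([i+1 for the maximal counts,
--         ties kept in order, 0-count indices kept while the max is 0], max count).
--         One backward pass with a counter dict instead of A's nested scans.
--     '''
--     n = len(lista)
--     counter = {}
--     rcounts = []
--     for i in range(n - 1, -1, -1):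
--         v = lista[i]
--         counter[v] = counter.get(v, 0) + 1
--         rcounts.append(counter.get(i, 0))
--     rcounts.reverse()
--     fila_max = []
--     count_max = 0
--     for idx, c in enumerate(rcounts):
--         if c == count_max:
--             fila_max.append(idx + 1)
--         elif c > count_max:
--             count_max = c
--             fila_max = [idx + 1]
--     return fila_max, count_max
-- ===== Notes on version B (the rewrite author's own statement) =====
-- stated objective: faster
-- what changed: A rescans the suffix lista[i:] for every index i (nested loops); B makes one backward pass maintaining a value->count dict so each suffix count is a single lookup, then one forward selection pass.
import Mathlib
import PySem

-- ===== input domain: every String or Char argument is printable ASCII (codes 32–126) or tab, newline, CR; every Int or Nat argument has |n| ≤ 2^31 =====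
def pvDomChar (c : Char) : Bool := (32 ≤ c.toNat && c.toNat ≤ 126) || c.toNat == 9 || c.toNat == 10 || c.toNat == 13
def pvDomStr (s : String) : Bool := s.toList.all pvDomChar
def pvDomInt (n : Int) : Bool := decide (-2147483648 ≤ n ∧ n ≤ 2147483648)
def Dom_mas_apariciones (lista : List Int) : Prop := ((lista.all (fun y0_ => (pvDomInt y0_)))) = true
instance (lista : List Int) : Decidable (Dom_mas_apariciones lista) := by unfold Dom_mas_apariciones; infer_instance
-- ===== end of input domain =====

-- B replaces A's nested suffix rescans by one backward counting pass with a dict plus one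
-- forward selection pass (objective: faster).

-- ===== PORT A =====
-- literal port of A: outer loop over i in range(n), inner loop recounting lista[i:];
-- lista[j] is ported as pyGetD lista j 0, exact because j is always in range here.
def mas_apariciones (lista : List Int) : List Int × Int :=
  (PySem.List.pyRange 0 (lista.length : Int) 1).foldl
    (fun (st : List Int × Int) (i : Int) =>
      let count : Int :=
        (PySem.List.pyRange i (lista.length : Int) 1).foldl
          (fun c j => if PySem.List.pyGetD lista j 0 = i then c + 1 else c) 0
      if count = st.2 then (st.1 ++ [i + 1], st.2)
      else if st.2 < count then ([i + 1], count)
      else st)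
    (([] : List Int), (0 : Int))

-- ===== PORT B =====
-- literal port of Source B: backward pass building the counter dict and rcounts (append, then
-- reverse), then the forward selection pass over enumerate(counts).
-- lista[i] is ported as pyGetD lista i 0, exact because i is always in range here.
def mas_apariciones_alt (lista : List Int) : List Int × Int :=
  let p :=
    (PySem.List.pyRange ((lista.length : Int) - 1) (-1) (-1)).foldl
      (fun (st : PySem.Dict Int Int × List Int) (i : Int) =>
        let v := PySem.List.pyGetD lista i 0
        let counter := st.1.insert v (st.1.getD v 0 + 1)
        (counter, st.2 ++ [counter.getD i 0]))
      (PySem.Dict.empty, ([] : List Int))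
  let counts := p.2.reverse
  (PySem.List.enumerate counts 0).foldl
    (fun (st : List Int × Int) (ic : Int × Int) =>
      if ic.2 = st.2 then (st.1 ++ [ic.1 + 1], st.2)
      else if st.2 < ic.2 then ([ic.1 + 1], ic.2)
      else st)
    (([] : List Int), (0 : Int))

-- ===== PRECONDITION & SPEC =====
def Spec_mas_apariciones (lista : List Int) (out : List Int × Int) : Prop := out = mas_apariciones_alt lista
instance (lista : List Int) (out : List Int × Int) : Decidable (Spec_mas_apariciones lista out) := by unfold Spec_mas_apariciones; infer_instance

-- ===== CLAIM (what is proved, stated in full; the proofs are below) =====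
def Claim_equal_mas_apariciones : Prop := ∀ (lista : List Int), Dom_mas_apariciones lista → Spec_mas_apariciones lista (mas_apariciones lista)

-- ===== LEMMAS AND PROOFS =====

-- count of the value k in the suffix lista[k:] — the quantity both programs compute per index
def pvCnt (lista : List Int) (k : Nat) : Int := ((lista.drop k).count (k : Int) : Int)

-- the shared selection step (A's outer-loop update = B's second-loop update)
def pvSel (st : List Int × Int) (ic : Int × Int) : List Int × Int :=
  if ic.2 = st.2 then (st.1 ++ [ic.1 + 1], st.2)
  else if st.2 < ic.2 then ([ic.1 + 1], ic.2)
  else st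

lemma innerA (lista : List Int) (i : Int) :
    ∀ (k : Nat) (c : Int),
      (PySem.List.pyRange (k : Int) (lista.length : Int) 1).foldl
        (fun c j => if PySem.List.pyGetD lista j 0 = i then c + 1 else c) c
      = c + ((lista.drop k).count i : Int) := by
  intro k
  induction hm : lista.length - k generalizing k with
  | zero =>
    intro c
    rw [PySem.List.pyRange_one_eq_nil (by exact_mod_cast (by omega : lista.length ≤ k))]
    rw [List.drop_eq_nil_of_le (by omega)]
    simp
  | succ m ih =>
    intro c
    have hk : k < lista.length := by omega
    rw [PySem.List.pyRange_one_cons (by exact_mod_cast hk)]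
    simp only [List.foldl_cons, PySem.List.pyGetD_natCast]
    have hget : lista.getD k 0 = lista[k] := List.getD_eq_getElem lista 0 hk
    have hcast : (k : Int) + 1 = ((k + 1 : Nat) : Int) := by push_cast; ring
    rw [hget, hcast, ih (k + 1) (by omega)]
    rw [List.drop_eq_getElem_cons hk, List.count_cons]
    by_cases h : lista[k] = i
    · simp [h]
      try push_cast
      try ring
    · have h2 : lista[k] ≠ i := h
      simp [h2]

lemma A_eq (lista : List Int) :
    mas_apariciones lista
      = ((List.range lista.length).map (fun (k : Nat) => ((k : Int), pvCnt lista k))).foldl pvSel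
          (([] : List Int), (0 : Int)) := by
  unfold mas_apariciones
  rw [PySem.List.pyRange_zero_natCast, List.foldl_map, List.foldl_map]
  congr 1
  funext st k
  simp only [innerA lista (k : Int) k 0, zero_add, pvSel, pvCnt]

lemma fold1B (lista : List Int) :
    ∀ (t : Nat), t ≤ lista.length → ∀ (d : PySem.Dict Int Int) (acc : List Int),
      (∀ v : Int, d.getD v 0 = ((lista.drop t).count v : Int)) →
      ((PySem.List.pyRange ((t : Int) - 1) (-1) (-1)).foldl
        (fun (st : PySem.Dict Int Int × List Int) (i : Int) =>
          let v := PySem.List.pyGetD lista i 0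
          let counter := st.1.insert v (st.1.getD v 0 + 1)
          (counter, st.2 ++ [counter.getD i 0]))
        (d, acc)).2
      = acc ++ ((List.range t).map (fun (k : Nat) => pvCnt lista k)).reverse := by
  intro t
  induction t with
  | zero =>
    intro _ d acc _
    rw [PySem.List.pyRange_neg_one_eq_nil (by norm_num)]
    simp
  | succ t ih =>
    intro ht d acc h
    have hk : t < lista.length := by omega
    have hstep : ((t + 1 : Nat) : Int) - 1 = (t : Int) := by push_cast; ring
    rw [hstep, PySem.List.pyRange_neg_one_cons (by exact_mod_cast (by omega : (-1 : Int) < (t : Nat))),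
        List.foldl_cons]
    simp only [PySem.List.pyGetD_natCast]
    have hget : lista.getD t 0 = lista[t] := List.getD_eq_getElem lista 0 hk
    have hdrop : lista.drop t = lista[t] :: lista.drop (t + 1) := List.drop_eq_getElem_cons hk
    have h' : ∀ w : Int,
        ((d.insert (lista.getD t 0) (d.getD (lista.getD t 0) 0 + 1)).getD w 0)
          = ((lista.drop t).count w : Int) := by
      intro w
      rw [hget]
      by_cases hw : w = lista[t]
      · subst hw
        rw [PySem.Dict.getD_insert_self, h, hdrop, List.count_cons]
        simp
        try push_cast
        try ring
      · have hw' : lista[t] ≠ w := Ne.symm hw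
        rw [PySem.Dict.getD_insert_of_ne _ _ _ hw, h, hdrop, List.count_cons]
        simp [hw']
    rw [ih (by omega) _ _ h']
    rw [h' (t : Int)]
    rw [List.range_succ]
    simp [pvCnt]

lemma enum_map_range (n : Nat) (f : Nat → Int) :
    PySem.List.enumerate ((List.range n).map f) 0
      = (List.range n).map (fun (k : Nat) => ((k : Int), f k)) := by
  induction n with
  | zero => simp
  | succ n ih =>
    rw [List.range_succ, List.map_append, List.map_append, PySem.List.enumerate_append, ih]
    simp [PySem.List.enumerate_cons, PySem.List.enumerate]

lemma B_eq (lista : List Int) :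
    mas_apariciones_alt lista
      = ((List.range lista.length).map (fun (k : Nat) => ((k : Int), pvCnt lista k))).foldl pvSel
          (([] : List Int), (0 : Int)) := by
  unfold mas_apariciones_alt
  dsimp only
  rw [fold1B lista lista.length le_rfl PySem.Dict.empty []
        (by intro v; simp [pysem, List.drop_length])]
  rw [List.nil_append, List.reverse_reverse, enum_map_range]
  rfl

-- ===== VERDICT (by name: the statement is the Claim_ definition above) =====
theorem mas_apariciones_spec : Claim_equal_mas_apariciones := by
  intro lista _
  unfold Spec_mas_apariciones
  rw [A_eq, B_eq]
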